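-- pv_equiv track=rewrite | github.com/zainmarshall/wilddex_zain | parser/parse.py | build_classification
-- ===== SOURCE A (Python) =====
-- def build_classification(parent_chain):
--     # parent_chain: list of dicts with rank and label
--     ranks = ["kingdom", "phylum", "class", "order", "family", "genus", "species"]
--     classification = {r: "" for r in ranks}
--     for node in parent_chain:
--         rank = node.get("taxonRankLabel", {}).get("value", "").lower()
--         label = node.get("itemLabel", {}).get("value", "")
--         if rank in classification:
--             classification[rank] = label
--     return classification
-- ===== SOURCE B (Python) =====
-- def build_classification(parent_chain):
--     ranks = ["kingdom", "phylum", "class", "order", "family", "genus", "species"]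
--
--     def last_label(r):
--         # last-wins: first match scanning from the end
--         for node in reversed(parent_chain):
--             if node.get("taxonRankLabel", {}).get("value", "").lower() == r:
--                 return node.get("itemLabel", {}).get("value", "")
--         return ""
--
--     return {r: last_label(r) for r in ranks}
-- ===== Notes on version B (the rewrite author's own statement) =====
-- stated objective: alternative
-- what changed: B maintains no dict at all: for each of the seven fixed ranks it searches the chain from the end for the last node of that rank (nested per-rank reverse scan), instead of one forward pass mutating a preseeded classification dict.
import Mathlib
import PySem

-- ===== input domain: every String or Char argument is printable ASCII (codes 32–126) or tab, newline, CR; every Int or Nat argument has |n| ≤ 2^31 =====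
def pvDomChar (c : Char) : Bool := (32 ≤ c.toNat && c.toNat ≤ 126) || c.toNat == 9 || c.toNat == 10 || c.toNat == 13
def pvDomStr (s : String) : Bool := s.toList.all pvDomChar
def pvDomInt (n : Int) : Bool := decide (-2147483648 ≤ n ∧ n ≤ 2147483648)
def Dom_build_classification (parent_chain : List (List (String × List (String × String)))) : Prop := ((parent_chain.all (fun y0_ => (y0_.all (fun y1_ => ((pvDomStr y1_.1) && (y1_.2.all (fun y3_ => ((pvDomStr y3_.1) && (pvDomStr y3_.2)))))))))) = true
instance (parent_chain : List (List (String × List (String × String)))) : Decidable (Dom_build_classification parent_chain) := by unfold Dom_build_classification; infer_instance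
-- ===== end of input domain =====

-- B keeps no dict at all: for each fixed rank it scans the chain from the end for the last
-- node of that rank (objective: alternative decomposition, same cost).

-- shared helpers: node.get(key, {}).get("value", "") for a node given as an assoc list
def pvNodeVal (node : List (String × List (String × String))) (key : String) : String :=
  (PySem.Dict.ofList ((PySem.Dict.ofList node).getD key [])).getD "value" ""

def pvRank (node : List (String × List (String × String))) : String :=
  PySem.Str.lower (pvNodeVal node "taxonRankLabel")

def pvLabel (node : List (String × List (String × String))) : String :=
  pvNodeVal node "itemLabel"

def pvRanks : List String :=
  ["kingdom", "phylum", "class", "order", "family", "genus", "species"]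

-- ===== PORT A =====
def build_classification (parent_chain : List (List (String × List (String × String)))) : List (String × String) :=
  let classification : PySem.Dict String String :=
    pvRanks.foldl (fun d r => d.insert r "") PySem.Dict.empty
  let final := parent_chain.foldl (fun d node =>
    let rank := pvRank node
    let label := pvLabel node
    if d.contains rank then d.insert rank label else d) classification
  final.items

-- ===== PORT B =====
-- last_label r: first match scanning the reversed chain, else ""
def pvLastLabel (parent_chain : List (List (String × List (String × String)))) (r : String) : String :=
  match parent_chain.reverse.find? (fun node => pvRank node == r) with
  | some node => pvLabel node
  | none => ""

def build_classification_alt (parent_chain : List (List (String × List (String × String)))) : List (String × String) :=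
  pvRanks.map (fun r => (r, pvLastLabel parent_chain r))

-- ===== PRECONDITION & SPEC =====
def Spec_build_classification (parent_chain : List (List (String × List (String × String)))) (out : List (String × String)) : Prop := out = build_classification_alt parent_chain
instance (parent_chain : List (List (String × List (String × String)))) (out : List (String × String)) : Decidable (Spec_build_classification parent_chain out) := by unfold Spec_build_classification; infer_instance

-- ===== CLAIM (what is proved, stated in full; the proofs are below) =====
def Claim_equal_build_classification : Prop := ∀ (parent_chain : List (List (String × List (String × String)))), Dom_build_classification parent_chain → Spec_build_classification parent_chain (build_classification parent_chain)

-- ===== LEMMAS AND PROOFS =====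

-- A's last-write-per-rank value, as a per-rank fold
def pvLast (r : String) (chain : List (List (String × List (String × String)))) (v : String) : String :=
  chain.foldl (fun v n => if pvRank n = r then pvLabel n else v) v

theorem pvA_fold (chain : List (List (String × List (String × String))))
    (d : PySem.Dict String String) (hk : d.keys = pvRanks) :
    (chain.foldl (fun d node =>
      let rank := pvRank node
      let label := pvLabel node
      if d.contains rank then d.insert rank label else d) d).items
    = pvRanks.map (fun r => (r, pvLast r chain (d.getD r ""))) := by
  induction chain generalizing d with
  | nil =>
    simp only [List.foldl_nil, pvLast]
    exact PySem.Dict.items_eq_map_keys d (by rw [hk]; decide) "" ▸ (by rw [hk])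
  | cons n t ih =>
    simp only [List.foldl_cons]
    by_cases hc : d.contains (pvRank n) = true
    · rw [if_pos hc]
      rw [ih _ (by rw [PySem.Dict.keys_insert_of_contains d (pvLabel n) hc, hk])]
      apply List.map_congr_left
      intro r _
      simp only [PySem.Dict.getD_insert, pvLast, List.foldl_cons]
      congr 1
      by_cases h : pvRank n = r
      · rw [if_pos h, if_pos h.symm]
      · rw [if_neg h, if_neg (fun hh => h hh.symm)]
    · rw [if_neg hc]
      rw [ih _ hk]
      apply List.map_congr_left
      intro r hr
      have hne : pvRank n ≠ r := by
        intro h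
        rw [PySem.Dict.contains_eq_decide_mem_keys, hk] at hc
        exact hc (by simp [h, hr])
      simp only [pvLast, List.foldl_cons, if_neg hne]

-- B's reverse search equals the per-rank last-wins fold
theorem pvB_find (r : String) (chain : List (List (String × List (String × String)))) (v : String) :
    (match chain.reverse.find? (fun node => pvRank node == r) with
     | some node => pvLabel node
     | none => v) = pvLast r chain v := by
  induction chain generalizing v with
  | nil => rfl
  | cons n t ih =>
    simp only [List.reverse_cons, List.find?_append, pvLast, List.foldl_cons]
    cases h : t.reverse.find? (fun node => pvRank node == r) with
    | some m =>
      have h2 := ih (v := if pvRank n = r then pvLabel n else v)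
      rw [h] at h2
      simp only [Option.some_or]
      simpa [pvLast] using h2
    | none =>
      have h2 := ih (v := if pvRank n = r then pvLabel n else v)
      rw [h] at h2
      simp only [pvLast] at h2 ⊢
      simp only [Option.none_or, List.find?_cons, List.find?_nil]
      rw [← h2]
      by_cases hr : pvRank n = r
      · simp [hr]
      · have hb : (pvRank n == r) = false := by simp [hr]
        simp [hb, hr]

theorem pvInit_getD (r : String) :
    ((pvRanks.foldl (fun d r => d.insert r "") PySem.Dict.empty : PySem.Dict String String)).getD r "" = "" := by
  show (PySem.Dict.mk [("kingdom",""),("phylum",""),("class",""),("order",""),("family",""),("genus",""),("species","")]).getD r "" = ""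
  simp only [PySem.Dict.getD_eq_get?_getD, PySem.Dict.get?_mk_cons]
  split_ifs <;> rfl

-- ===== VERDICT (by name: the statement is the Claim_ definition above) =====
theorem build_classification_spec : Claim_equal_build_classification := by
  intro pc _
  unfold Spec_build_classification build_classification build_classification_alt
  rw [pvA_fold pc _ (by decide)]
  apply List.map_congr_left
  intro r _
  rw [pvInit_getD]
  unfold pvLastLabel
  rw [pvB_find]
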